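-- pv_equiv track=rewrite | github.com/asreview/asreview | asreview/io/utils.py | convert_keywords
-- ===== SOURCE A (Python) =====
-- def convert_keywords(keywords):
--     """Split keywords separated by commas etc to lists."""
--     if not isinstance(keywords, str):
--         return keywords
--
--     current_best = [keywords]
--     for splitter in [", ", "; ", ": ", ";", ":"]:
--         new_split = keywords.split(splitter)
--         if len(new_split) > len(current_best):
--             current_best = new_split
--     return current_best
-- ===== SOURCE B (Python) =====
-- def convert_keywords(keywords):
--     """Split keywords separated by commas etc to lists."""
--     if not isinstance(keywords, str):
--         return keywords
--
--     # One character-level pass computing all five separator counts at once.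
--     c_comma_sp = c_semi_sp = c_colon_sp = c_semi = c_colon = 0
--     n = len(keywords)
--     for i, ch in enumerate(keywords):
--         nxt = keywords[i + 1] if i + 1 < n else ""
--         if ch == "," and nxt == " ":
--             c_comma_sp += 1
--         elif ch == ";":
--             c_semi += 1
--             if nxt == " ":
--                 c_semi_sp += 1
--         elif ch == ":":
--             c_colon += 1
--             if nxt == " ":
--                 c_colon_sp += 1
--     counts = [c_comma_sp, c_semi_sp, c_colon_sp, c_semi, c_colon]
--     seps = [", ", "; ", ": ", ";", ":"]
--     best = 0
--     for j in range(1, 5):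
--         if counts[j] > counts[best]:
--             best = j
--     if counts[best] == 0:
--         return [keywords]
--     return keywords.split(seps[best])
-- ===== Notes on version B (the rewrite author's own statement) =====
-- stated objective: alternative
-- what changed: Instead of calling str.split five times and keeping the longest result list, B makes one character-level pass over the string with five counters (a tiny state machine reading each char and its successor, counting ', ', '; ', ': ', ';', ':' simultaneously), picks the first index with the maximal count, and performs a single split by that separator (none if all counts are zero).
import Mathlib
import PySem

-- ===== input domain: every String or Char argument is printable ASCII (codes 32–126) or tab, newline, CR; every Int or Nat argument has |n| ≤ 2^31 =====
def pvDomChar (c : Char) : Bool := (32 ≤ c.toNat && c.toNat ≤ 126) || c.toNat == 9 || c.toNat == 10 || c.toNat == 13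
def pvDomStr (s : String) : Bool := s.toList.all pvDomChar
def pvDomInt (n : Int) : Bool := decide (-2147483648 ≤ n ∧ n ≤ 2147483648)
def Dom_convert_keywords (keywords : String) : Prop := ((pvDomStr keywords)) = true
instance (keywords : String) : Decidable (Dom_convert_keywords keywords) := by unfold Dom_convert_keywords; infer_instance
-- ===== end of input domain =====

-- B replaces A's five str.split calls by one character-level pass computing all five
-- separator counts at once, then a single split by the first-maximal separator
-- (objective: alternative decomposition, similar cost).

-- ===== PORT A =====
-- Python A splits by every separator and keeps the strictly longest split so far.
def convert_keywords (keywords : String) : List String :=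
  [", ", "; ", ": ", ";", ":"].foldl
    (fun current_best splitter =>
      let new_split := (PySem.Str.split? keywords splitter).getD [keywords]
      if current_best.length < new_split.length then new_split else current_best)
    [keywords]

-- ===== PORT B =====
-- B's char scan: for each char and its successor, bump the matching counters
-- (", " / "; " / ": " / ";" / ":").  Structural recursion over the char list,
-- the same per-character state updates as Source B's loop.
def pvScan5 : List Char → Nat × Nat × Nat × Nat × Nat
  | [] => (0, 0, 0, 0, 0)
  | c :: rest =>
    let t := pvScan5 rest
    let nxt := rest.head?
    if c = ',' ∧ nxt = some ' ' then (t.1 + 1, t.2.1, t.2.2.1, t.2.2.2.1, t.2.2.2.2)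
    else if c = ';' then
      (t.1, (if nxt = some ' ' then t.2.1 + 1 else t.2.1), t.2.2.1, t.2.2.2.1 + 1, t.2.2.2.2)
    else if c = ':' then
      (t.1, t.2.1, (if nxt = some ' ' then t.2.2.1 + 1 else t.2.2.1), t.2.2.2.1, t.2.2.2.2 + 1)
    else t

def convert_keywords_alt (keywords : String) : List String :=
  let t := pvScan5 keywords.toList
  let counts : List Nat := [t.1, t.2.1, t.2.2.1, t.2.2.2.1, t.2.2.2.2]
  let seps : List String := [", ", "; ", ": ", ";", ":"]
  let best := [1, 2, 3, 4].foldl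
    (fun best j => if counts.getD best 0 < counts.getD j 0 then j else best) 0
  if counts.getD best 0 = 0 then [keywords]
  else (PySem.Str.split? keywords (seps.getD best "")).getD [keywords]

-- ===== PRECONDITION & SPEC =====
def Spec_convert_keywords (keywords : String) (out : List String) : Prop := out = convert_keywords_alt keywords
instance (keywords : String) (out : List String) : Decidable (Spec_convert_keywords keywords out) := by unfold Spec_convert_keywords; infer_instance

-- ===== CLAIM (what is proved, stated in full; the proofs are below) =====
def Claim_equal_convert_keywords : Prop := ∀ (keywords : String), Dom_convert_keywords keywords → Spec_convert_keywords keywords (convert_keywords keywords)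

-- ===== LEMMAS AND PROOFS =====

-- naive count of occurrences of "<a> " (they can never overlap when a ≠ ' ')
def pvPairCount (a : Char) : List Char → Nat
  | [] => 0
  | c :: rest => (if c = a ∧ rest.head? = some ' ' then 1 else 0) + pvPairCount a rest

-- unfolding equations for the fueled helper of PySem.Chars.count
theorem cgo_nil (sub : List Char) (fuel : Nat) (acc : Nat) :
    PySem.Chars.count.go sub fuel [] acc = acc := by cases fuel <;> rfl

theorem cgo_cons (sub : List Char) (fuel : Nat) (h : Char) (t : List Char) (acc : Nat) :
    PySem.Chars.count.go sub (fuel + 1) (h :: t) acc =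
      if sub.isPrefixOf (h :: t) then
        PySem.Chars.count.go sub fuel ((h :: t).drop sub.length) (acc + 1)
      else PySem.Chars.count.go sub fuel t acc := rfl

theorem cgo_shift (sub : List Char) (fuel : Nat) :
    ∀ (l : List Char) (acc : Nat),
      PySem.Chars.count.go sub fuel l acc = acc + PySem.Chars.count.go sub fuel l 0 := by
  induction fuel with
  | zero => intro l acc; rfl
  | succ f ih =>
    intro l acc
    cases l with
    | nil => simp [cgo_nil]
    | cons h t =>
      rw [cgo_cons, cgo_cons]
      by_cases hp : sub.isPrefixOf (h :: t)
      · simp only [hp, if_true]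
        rw [ih _ (acc + 1), ih _ (0 + 1)]
        omega
      · simp only [hp]
        exact ih t acc

-- Python's non-overlapping count of "<a> " equals the naive pair count (a ≠ ' ')
theorem cgo_pair (a : Char) (ha : a ≠ ' ') :
    ∀ (fuel : Nat) (l : List Char), l.length ≤ fuel →
      PySem.Chars.count.go [a, ' '] fuel l 0 = pvPairCount a l := by
  intro fuel
  induction fuel with
  | zero =>
    intro l h
    have : l = [] := List.length_eq_zero_iff.mp (Nat.le_zero.mp h)
    subst this; rfl
  | succ f ih =>
    intro l h
    cases l with
    | nil => simp [cgo_nil, pvPairCount]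
    | cons c t =>
      rw [cgo_cons]
      by_cases hp : ([a, ' '] : List Char).isPrefixOf (c :: t)
      · cases t with
        | nil => exact absurd hp (by simp [List.isPrefixOf])
        | cons d t' =>
          have hcd : a = c ∧ ' ' = d := by simpa [List.isPrefixOf] using hp
          obtain ⟨h1, h2⟩ := hcd
          subst h1
          subst h2
          simp only [hp, if_true]
          rw [show (([a, ' '] : List Char).length) = 2 from rfl]
          rw [show ((a :: ' ' :: t').drop 2) = t' from rfl]
          rw [cgo_shift, ih t' (by simp at h; omega)]
          simp [pvPairCount, Nat.add_comm]
          rw [if_neg (fun h => absurd h.1.symm ha)]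
          omega
      · have hcond : ¬ (c = a ∧ t.head? = some ' ') := by
          rintro ⟨rfl, h2⟩
          apply hp
          cases t with
          | nil => simp at h2
          | cons d t2 =>
            simp only [List.head?_cons, Option.some.injEq] at h2
            subst h2
            simp [List.isPrefixOf]
        simp only [hp]
        rw [ih t (by simp at h; omega)]
        simp [pvPairCount, hcond]
    
-- Python's count of a single char equals List.count
theorem cgo_single (a : Char) :
    ∀ (fuel : Nat) (l : List Char), l.length ≤ fuel →
      PySem.Chars.count.go [a] fuel l 0 = l.count a := by
  intro fuel
  induction fuel with
  | zero =>
    intro l h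
    have : l = [] := List.length_eq_zero_iff.mp (Nat.le_zero.mp h)
    subst this; rfl
  | succ f ih =>
    intro l h
    cases l with
    | nil => simp [cgo_nil]
    | cons c t =>
      rw [cgo_cons]
      have hlt : t.length ≤ f := by simp at h; omega
      by_cases hp : ([a] : List Char).isPrefixOf (c :: t)
      · have hc : a = c := by simpa [List.isPrefixOf] using hp
        subst hc
        simp only [hp, if_true, List.length_cons, List.length_nil]
        rw [show ((a :: t).drop (0 + 1)) = t from rfl]
        rw [cgo_shift, ih t hlt]
        simp
        omega
      · have hc : ¬ a = c := by
          intro hh; apply hp; subst hh; simp [List.isPrefixOf]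
        simp only [hp]
        rw [ih t hlt]
        simp [List.count_cons]
        exact fun h' => hc h'.symm

-- the scan computes exactly the five counts
theorem pvScan5_eq (l : List Char) :
    pvScan5 l = (pvPairCount ',' l, pvPairCount ';' l, pvPairCount ':' l,
                 l.count ';', l.count ':') := by
  induction l with
  | nil => rfl
  | cons c rest ih =>
    simp only [pvScan5, ih, pvPairCount, List.count_cons]
    by_cases h1 : c = ',' ∧ rest.head? = some ' '
    · obtain ⟨rfl, h1b⟩ := h1
      simp [h1b, Nat.add_comm]
    · simp only [h1, if_false]
      by_cases h2 : c = ';'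
      · subst h2
        by_cases hsp : rest.head? = some ' ' <;> simp [hsp, Nat.add_comm]
      · simp only [if_neg h2]
        by_cases h3 : c = ':'
        · subst h3
          by_cases hsp : rest.head? = some ' ' <;>
            simp [hsp, Nat.add_comm]
        · simp [h2, h3]

-- bridges from PySem.Str.count to the scan components
theorem str_count_pair (s : String) (a : Char) (sep : String)
    (hsep : sep.toList = [a, ' ']) (ha : a ≠ ' ') :
    PySem.Str.count s sep = pvPairCount a s.toList := by
  rw [PySem.Str.count_eq, hsep]
  simp only [PySem.Chars.count]
  rw [if_neg (by simp)]
  exact cgo_pair a ha s.toList.length s.toList (le_refl _)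

theorem str_count_single (s : String) (a : Char) (sep : String)
    (hsep : sep.toList = [a]) :
    PySem.Str.count s sep = s.toList.count a := by
  rw [PySem.Str.count_eq, hsep]
  simp only [PySem.Chars.count]
  rw [if_neg (by simp)]
  exact cgo_single a s.toList.length s.toList (le_refl _)

theorem toList_ne_nil (sep : String) (h : sep ≠ "") : sep.toList ≠ [] := by
  intro hn
  apply h
  have := congrArg String.ofList hn
  simpa using this

-- unfolding equations for the fueled helper of PySem.Chars.splitOn
theorem sgo_nil (sep : List Char) (fuel : Nat) (cur : List Char) (acc : List (List Char)) :
    PySem.Chars.splitOn.go sep fuel [] cur acc = (cur.reverse :: acc).reverse := by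
  cases fuel
  · show ((cur.reverse ++ []) :: acc).reverse = _
    simp
  · rfl

theorem sgo_cons (sep : List Char) (fuel : Nat) (h : Char) (t : List Char)
    (cur : List Char) (acc : List (List Char)) :
    PySem.Chars.splitOn.go sep (fuel + 1) (h :: t) cur acc =
      if sep.isPrefixOf (h :: t) then
        PySem.Chars.splitOn.go sep fuel ((h :: t).drop sep.length) [] (cur.reverse :: acc)
      else PySem.Chars.splitOn.go sep fuel t (h :: cur) acc := rfl

-- the length of splitOn.go's result is acc.length + 1 + the number of matches
theorem go_len (sub : List Char) (hsub : sub ≠ []) :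
    ∀ (fuel₁ fuel₂ : Nat) (l cur : List Char) (acc : List (List Char)),
      l.length ≤ fuel₁ → l.length ≤ fuel₂ →
      (PySem.Chars.splitOn.go sub fuel₁ l cur acc).length =
        acc.length + 1 + PySem.Chars.count.go sub fuel₂ l 0 := by
  intro fuel₁
  induction fuel₁ with
  | zero =>
    intro fuel₂ l cur acc h1 _
    have : l = [] := List.length_eq_zero_iff.mp (Nat.le_zero.mp h1)
    subst this
    simp [sgo_nil, cgo_nil]
  | succ f ih =>
    intro fuel₂ l cur acc h1 h2
    cases l with
    | nil => simp [sgo_nil, cgo_nil]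
    | cons h t =>
      cases fuel₂ with
      | zero => simp at h2
      | succ f₂ =>
        rw [sgo_cons, cgo_cons]
        by_cases hp : sub.isPrefixOf (h :: t)
        · simp only [hp, if_true]
          have hlen : ((h :: t).drop sub.length).length ≤ f ∧
              ((h :: t).drop sub.length).length ≤ f₂ := by
            have : 1 ≤ sub.length := by
              cases sub with
              | nil => exact absurd rfl hsub
              | cons a b => simp
            constructor <;> · simp only [List.length_drop]; simp at h1 h2 ⊢; omega
          rw [ih f₂ _ _ _ hlen.1 hlen.2]
          conv_rhs => rw [cgo_shift]
          simp
          omega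
        · simp only [hp]
          have ht1 : t.length ≤ f := by simp at h1; omega
          have ht2 : t.length ≤ f₂ := by simp at h2; omega
          exact ih f₂ t (h :: cur) acc ht1 ht2

-- len(s.split(sep)) = s.count(sep) + 1 for nonempty sep
theorem len_splitD (s sep : String) (h : sep ≠ "") :
    ((PySem.Str.split? s sep).getD [s]).length = PySem.Str.count s sep + 1 := by
  have hl := toList_ne_nil sep h
  have hemp : sep.toList.isEmpty = false := by
    cases hh : sep.toList with
    | nil => exact absurd hh hl
    | cons a b => simp
  simp only [PySem.Str.split?, PySem.Chars.split?, hemp, Bool.false_eq_true, if_false,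
    Option.map_some, Option.getD_some, List.length_map]
  rw [PySem.Str.count_eq]
  simp only [PySem.Chars.count, hemp, Bool.false_eq_true, if_false, PySem.Chars.splitOn]
  rw [go_len sep.toList hl (s.toList.length + 1) s.toList.length s.toList [] []
    (Nat.le_succ _) (le_refl _), List.length_nil]
  omega

-- A's loop invariant (from the split-lengths side): current_best is the best pair so far
theorem fold_equiv (s : String) :
    ∀ (seps : List String), (∀ t ∈ seps, t ≠ "") →
    ∀ (b : String × Nat), b.1 ≠ "" → b.2 = PySem.Str.count s b.1 →
    seps.foldl
        (fun current_best splitter =>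
          let new_split := (PySem.Str.split? s splitter).getD [s]
          if current_best.length < new_split.length then new_split else current_best)
        (if b.2 = 0 then [s] else (PySem.Str.split? s b.1).getD [s])
      =
    (if ((seps.map (fun sep => (sep, PySem.Str.count s sep))).foldl
          (fun b t => if b.2 < t.2 then t else b) b).2 = 0 then [s]
     else (PySem.Str.split? s
          ((seps.map (fun sep => (sep, PySem.Str.count s sep))).foldl
            (fun b t => if b.2 < t.2 then t else b) b).1).getD [s]) := by
  intro seps
  induction seps with
  | nil => intro _ b _ _; rfl
  | cons sep rest ih =>
    intro hne b hb1 hb2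
    have hsep : sep ≠ "" := hne sep (List.mem_cons_self)
    have hrest : ∀ t ∈ rest, t ≠ "" := fun t ht => hne t (List.mem_cons_of_mem _ ht)
    simp only [List.foldl_cons, List.map_cons]
    have hcur_len : (if b.2 = 0 then [s] else (PySem.Str.split? s b.1).getD [s]).length
        = b.2 + 1 := by
      by_cases hz : b.2 = 0
      · simp [hz]
      · simp only [hz, if_false]
        rw [len_splitD s b.1 hb1, hb2]
    by_cases hlt : b.2 < PySem.Str.count s sep
    · have : (if b.2 = 0 then [s] else (PySem.Str.split? s b.1).getD [s]).length
          < ((PySem.Str.split? s sep).getD [s]).length := by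
        rw [hcur_len, len_splitD s sep hsep]; omega
      simp only [this, if_true, hlt, if_true]
      have hpos : PySem.Str.count s sep ≠ 0 := by omega
      have := ih hrest (sep, PySem.Str.count s sep) hsep rfl
      simp only [hpos, if_false] at this
      exact this
    · have : ¬ ((if b.2 = 0 then [s] else (PySem.Str.split? s b.1).getD [s]).length
          < ((PySem.Str.split? s sep).getD [s]).length) := by
        rw [hcur_len, len_splitD s sep hsep]; omega
      simp only [this, if_false, hlt, if_false]
      exact ih hrest b hb1 hb2

-- A's whole loop, for a generic nonempty separator list, equals count/argmax-pair/split
theorem main_gen (s sep0 : String) (rest : List String) (h0 : sep0 ≠ "")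
    (hr : ∀ t ∈ rest, t ≠ "") :
    (sep0 :: rest).foldl
      (fun current_best splitter =>
        let new_split := (PySem.Str.split? s splitter).getD [s]
        if current_best.length < new_split.length then new_split else current_best)
      [s]
    = (let seps := sep0 :: rest
       let pairs := seps.map (fun sep => (sep, PySem.Str.count s sep))
       let best := pairs.tail.foldl (fun b t => if b.2 < t.2 then t else b) (pairs.headD ("", 0))
       if best.2 = 0 then [s] else (PySem.Str.split? s best.1).getD [s]) := by
  simp only [List.map_cons, List.tail_cons, List.headD_cons, List.foldl_cons]
  have hfirst :
      (if ([s] : List String).length < ((PySem.Str.split? s sep0).getD [s]).length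
        then (PySem.Str.split? s sep0).getD [s] else [s])
      = (if PySem.Str.count s sep0 = 0 then [s] else (PySem.Str.split? s sep0).getD [s]) := by
    rw [len_splitD s sep0 h0]
    by_cases hz : PySem.Str.count s sep0 = 0
    · simp only [hz, List.length_singleton]
      norm_num
    · have h1 : ([s] : List String).length < PySem.Str.count s sep0 + 1 := by
        simp only [List.length_singleton]; omega
      simp only [h1, if_true, hz, if_false]
  rw [hfirst]
  exact fold_equiv s rest hr (sep0, PySem.Str.count s sep0) h0 (by simp)

-- the pair-argmax over the five pairs picks the same winner as B's index argmax
set_option maxHeartbeats 4000000 in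
theorem bridge (s : String) (n1 n2 n3 n4 n5 : Nat) :
    (if (([("; ", n2), (": ", n3), (";", n4), (":", n5)] : List (String × Nat)).foldl
          (fun b t => if b.2 < t.2 then t else b) (", ", n1)).2 = 0 then [s]
     else (PySem.Str.split? s
        ((([("; ", n2), (": ", n3), (";", n4), (":", n5)] : List (String × Nat)).foldl
          (fun b t => if b.2 < t.2 then t else b) (", ", n1)).1)).getD [s])
    =
    (let counts : List Nat := [n1, n2, n3, n4, n5]
     let best := ([1, 2, 3, 4] : List Nat).foldl
       (fun best j => if counts.getD best 0 < counts.getD j 0 then j else best) 0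
     if counts.getD best 0 = 0 then [s]
     else (PySem.Str.split? s (([", ", "; ", ": ", ";", ":"] : List String).getD best "")).getD [s]) := by
  simp only [List.foldl_cons, List.foldl_nil, List.getD_cons_succ, List.getD_cons_zero]
  split_ifs
  all_goals simp only [List.getD_cons_succ, List.getD_cons_zero] at *
  all_goals omega

-- ===== VERDICT (by name: the statement is the Claim_ definition above) =====
set_option maxHeartbeats 1600000 in
theorem convert_keywords_spec : Claim_equal_convert_keywords := by
  intro s _
  unfold Spec_convert_keywords convert_keywords convert_keywords_alt
  have e1 : pvPairCount ',' s.toList = PySem.Str.count s ", " :=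
    (str_count_pair s ',' ", " (by decide) (by decide)).symm
  have e2 : pvPairCount ';' s.toList = PySem.Str.count s "; " :=
    (str_count_pair s ';' "; " (by decide) (by decide)).symm
  have e3 : pvPairCount ':' s.toList = PySem.Str.count s ": " :=
    (str_count_pair s ':' ": " (by decide) (by decide)).symm
  have e4 : s.toList.count ';' = PySem.Str.count s ";" :=
    (str_count_single s ';' ";" (by decide)).symm
  have e5 : s.toList.count ':' = PySem.Str.count s ":" :=
    (str_count_single s ':' ":" (by decide)).symm
  rw [main_gen s ", " ["; ", ": ", ";", ":"] (by decide) (by decide)]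
  simp only [pvScan5_eq, e1, e2, e3, e4, e5, List.map_cons, List.map_nil,
    List.tail_cons, List.headD_cons]
  exact bridge s (PySem.Str.count s ", ") (PySem.Str.count s "; ")
    (PySem.Str.count s ": ") (PySem.Str.count s ";") (PySem.Str.count s ":")
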